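-- pv_equiv track=rewrite | github.com/gauravchak/open_questions | num_seating_arrangements/get_num_seating_arrangements.py | get_num_seating_arrangements_in_row
-- ===== SOURCE A (Python) =====
-- factmap: dict = {}
--
-- def factorial(n: int) -> int:
--     if n in factmap:
--         return factmap[n]
--     elif n == 0:
--         return 1
--     elif n == 1:
--         return 1
--     else:
--         retval = factorial(n - 1) * n
--         factmap[n] = retval
--         return retval
--
-- def get_num_seating_arrangements_in_row(num_together: int, row_str: str) -> int:
--     i = 0
--     num_empty_in_zone = 0
--     retval = 0
--     while (i < len(row_str)):
--         if row_str[i] == 'E':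
--             num_empty_in_zone = num_empty_in_zone + 1
--         elif row_str[i] != '|':
--             if num_empty_in_zone >= num_together:
--                 retval = retval + (factorial(num_empty_in_zone) //
--                                    (factorial(num_together) * factorial(num_empty_in_zone - num_together)))
--             num_empty_in_zone = 0
--         i = i + 1
--     if num_empty_in_zone >= num_together:
--         retval = retval + (factorial(num_empty_in_zone) //
--                            (factorial(num_together) * factorial(num_empty_in_zone - num_together)))
--     return retval
-- ===== SOURCE B (Python) =====
-- def _comb(n: int, k: int) -> int:
--     # multiplicative binomial coefficient; every intermediate division is exact
--     c = 1
--     for i in range(1, k + 1):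
--         c = c * (n - k + i) // i
--     return c
--
--
-- def get_num_seating_arrangements_in_row(num_together: int, row_str: str) -> int:
--     # two phases: build the seat zones by splitting, then reduce with C(len, k)
--     zones = ''.join('E' if c == 'E' else ' ' for c in row_str if c != '|').split(' ')
--     total = 0
--     for z in zones:
--         n = len(z)
--         if n >= num_together:
--             total += _comb(n, num_together)
--     return total
-- ===== Notes on version B (the rewrite author's own statement) =====
-- stated objective: alternative
-- what changed: A's single incremental pass with memoized factorials and factorial-quotient binomials is replaced by a two-phase decomposition: normalize the row ('|' dropped, other non-'E' chars mapped to a separator), split it into zones, and sum a multiplicative binomial C(len(zone), k) over the zones.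
import Mathlib
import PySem

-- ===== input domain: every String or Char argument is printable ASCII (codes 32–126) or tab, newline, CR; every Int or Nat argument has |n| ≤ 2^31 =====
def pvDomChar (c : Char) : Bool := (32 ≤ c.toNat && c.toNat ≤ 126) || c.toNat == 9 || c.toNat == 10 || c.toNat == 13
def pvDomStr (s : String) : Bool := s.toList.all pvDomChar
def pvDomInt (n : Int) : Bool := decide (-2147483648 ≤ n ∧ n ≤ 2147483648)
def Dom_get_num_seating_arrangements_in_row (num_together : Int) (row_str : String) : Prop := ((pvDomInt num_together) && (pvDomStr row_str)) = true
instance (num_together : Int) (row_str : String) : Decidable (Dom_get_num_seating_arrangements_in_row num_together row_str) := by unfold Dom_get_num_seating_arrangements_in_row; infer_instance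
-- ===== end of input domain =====

-- B replaces A's single incremental pass (memoized factorials, factorial-quotient binomials) by a
-- two-phase split-into-zones-then-sum with a multiplicative binomial; the return values agree for
-- num_together ≥ 0 (A's RecursionError on negative num_together is excluded by Pre_).

-- ===== PORT A =====

-- A's memoized `factorial`: the module-level dict `factmap` is a pure cache (it never changes any
-- returned value), so the port is the bare recursion; the argument is Nat because Python's
-- recursion terminates only for nonnegative n (negative arguments raise RecursionError, and under
-- Pre_ every call site receives a nonnegative value).
def factA : Nat → Int
  | 0 => 1
  | 1 => 1
  | n + 2 => factA (n + 1) * ((n : Int) + 2)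

-- the `while` loop: state (num_empty_in_zone, retval), one step per character of row_str
def loopA (k : Int) : List Char → Int × Int → Int × Int
  | [], st => st
  | c :: cs, (ne, rv) =>
    if c = 'E' then loopA k cs (ne + 1, rv)
    else if c ≠ '|' then
      loopA k cs (0,
        if k ≤ ne then
          rv + PySem.Int.floordiv (factA ne.toNat) (factA k.toNat * factA (ne - k).toNat)
        else rv)
    else loopA k cs (ne, rv)

def get_num_seating_arrangements_in_row (num_together : Int) (row_str : String) : Int :=
  let st := loopA num_together row_str.toList (0, 0)
  if num_together ≤ st.1 then
    st.2 + PySem.Int.floordiv (factA st.1.toNat)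
      (factA num_together.toNat * factA (st.1 - num_together).toNat)
  else st.2

-- ===== PORT B =====

-- B's `_comb`: multiplicative binomial coefficient
def combB (n k : Int) : Int :=
  (PySem.List.pyRange 1 (k + 1) 1).foldl (fun c i => PySem.Int.floordiv (c * (n - k + i)) i) 1

-- `''.join('E' if c == 'E' else ' ' for c in row_str if c != '|').split(' ')` — the join of single
-- characters is the character list itself, and split(' ') is PySem.Chars.splitOn — then the sum loop.
def get_num_seating_arrangements_in_row_alt (num_together : Int) (row_str : String) : Int :=
  let zones := PySem.Chars.splitOn
    ((row_str.toList.filter (fun c => c ≠ '|')).map (fun c => if c = 'E' then 'E' else ' ')) [' ']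
  zones.foldl (fun total z =>
    if num_together ≤ (z.length : Int) then total + combB (z.length : Int) num_together
    else total) 0

-- ===== PRECONDITION & SPEC =====
-- Pre_ excludes negative num_together, on which A's factorial recurses without end (RecursionError).
def Pre_get_num_seating_arrangements_in_row (num_together : Int) (_row_str : String) : Prop :=
  0 ≤ num_together
instance (num_together : Int) (row_str : String) : Decidable (Pre_get_num_seating_arrangements_in_row num_together row_str) := by unfold Pre_get_num_seating_arrangements_in_row; infer_instance

def pvWitness_get_num_seating_arrangements_in_row : Int × String := (2, "EE|EXEEE.E")

def Spec_get_num_seating_arrangements_in_row (num_together : Int) (row_str : String) (out : Int) : Prop := out = get_num_seating_arrangements_in_row_alt num_together row_str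
instance (num_together : Int) (row_str : String) (out : Int) : Decidable (Spec_get_num_seating_arrangements_in_row num_together row_str out) := by unfold Spec_get_num_seating_arrangements_in_row; infer_instance

-- ===== CLAIM (what is proved, stated in full; the proofs are below) =====
def Claim_equal_get_num_seating_arrangements_in_row : Prop := ∀ (num_together : Int) (row_str : String), Dom_get_num_seating_arrangements_in_row num_together row_str → Pre_get_num_seating_arrangements_in_row num_together row_str → Spec_get_num_seating_arrangements_in_row num_together row_str (get_num_seating_arrangements_in_row num_together row_str)

-- ===== LEMMAS AND PROOFS =====

-- reference split: Python's s.split(' ') written structurally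
def mySplit : List Char → List (List Char)
  | [] => [[]]
  | c :: cs => if c = ' ' then [] :: mySplit cs
               else (c :: (mySplit cs).headI) :: (mySplit cs).tail

-- zone lengths of the original row: '|' is transparent, 'E' extends the current zone,
-- any other character closes it
def segsL : List Char → List Nat
  | [] => [0]
  | c :: cs => if c = '|' then segsL cs
               else if c = 'E' then ((segsL cs).headI + 1) :: (segsL cs).tail
               else 0 :: segsL cs

-- the common value: sum of C(n, kn) over zone lengths n with kn ≤ n
def scoreK (kn : Nat) (l : List Nat) : Int :=
  (l.map (fun n => if kn ≤ n then (n.choose kn : Int) else 0)).sum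

-- splitOn.go's accumulated current piece, prepended to the first piece of a split
def addF (cur : List Char) : List (List Char) → List (List Char)
  | [] => [cur.reverse]
  | h :: t => (cur.reverse ++ h) :: t

-- A's trailing `if num_empty_in_zone >= num_together: retval += …` after the loop
def finishA (k : Int) (st : Int × Int) : Int :=
  if k ≤ st.1 then
    st.2 + PySem.Int.floordiv (factA st.1.toNat) (factA k.toNat * factA (st.1 - k).toNat)
  else st.2

theorem mySplit_ne_nil (l : List Char) : mySplit l ≠ [] := by
  cases l with
  | nil => simp [mySplit]
  | cons c cs => simp only [mySplit]; split <;> simp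

theorem segsL_ne_nil (l : List Char) : segsL l ≠ [] := by
  induction l with
  | nil => simp [segsL]
  | cons c cs ih => simp only [segsL]; split; · exact ih
                    split <;> simp

theorem factA_eq (n : Nat) : factA n = (n.factorial : Int) := by
  induction n using factA.induct with
  | case1 => simp [factA]
  | case2 => simp [factA]
  | case3 n ih => simp [factA, Nat.factorial, ih]; ring

theorem binom_div (n kn : Nat) (h : kn ≤ n) :
    PySem.Int.floordiv (factA n) (factA kn * factA (n - kn)) = (n.choose kn : Int) := by
  rw [factA_eq, factA_eq, factA_eq, ← Nat.cast_mul, PySem.Int.floordiv_natCast]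
  have := Nat.choose_mul_factorial_mul_factorial h
  rw [show n.factorial = n.choose kn * (kn.factorial * (n - kn).factorial) by rw [← this]; ring]
  rw [Nat.mul_div_cancel _ (by positivity)]

theorem comb_fold (n kn j : Nat) (hj : j ≤ kn) (hk : kn ≤ n) :
    (PySem.List.pyRange 1 ((j : Int) + 1) 1).foldl
      (fun c i => PySem.Int.floordiv (c * ((n : Int) - (kn : Int) + i)) i) 1
      = ((n - kn + j).choose j : Int) := by
  induction j with
  | zero => simp [PySem.List.pyRange_one_eq_nil]
  | succ j ih =>
    have h1 : ((j + 1 : Nat) : Int) + 1 = ((j : Int) + 1) + 1 := by push_cast; ring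
    rw [h1, PySem.List.pyRange_one_succ_right (by omega), List.foldl_append]
    rw [ih (by omega)]
    simp only [List.foldl]
    have hcast : (n : Int) - (kn : Int) + ((j : Int) + 1) = ((n - kn + j + 1 : Nat) : Int) := by
      have : kn ≤ n := hk
      push_cast
      omega
    rw [hcast, ← Nat.cast_mul, show ((j : Int) + 1) = ((j + 1 : Nat) : Int) by push_cast; ring,
        PySem.Int.floordiv_natCast]
    have hid : (n - kn + j).choose j * (n - kn + j + 1) = (n - kn + j + 1).choose (j + 1) * (j + 1) := by
      have := Nat.add_one_mul_choose_eq (n - kn + j) j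
      linarith
    rw [hid, Nat.mul_div_cancel _ (by omega)]
    congr 2
    try omega

theorem combB_eq (n kn : Nat) (h : kn ≤ n) : combB (n : Int) (kn : Int) = (n.choose kn : Int) := by
  unfold combB
  rw [comb_fold n kn kn le_rfl h]
  congr 2
  omega

theorem go_eq (fuel : Nat) : ∀ (l cur : List Char) (acc : List (List Char)), l.length < fuel →
    PySem.Chars.splitOn.go [' '] fuel l cur acc = acc.reverse ++ addF cur (mySplit l) := by
  induction fuel with
  | zero => intro l cur acc h; omega
  | succ fuel ih =>
    intro l cur acc h
    cases l with
    | nil => simp [PySem.Chars.splitOn.go, mySplit, addF]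
    | cons c rest =>
      rw [PySem.Chars.splitOn.go]
      by_cases hc : c = ' '
      · subst hc
        have hpre : [' '].isPrefixOf (' ' :: rest) = true := by simp [List.isPrefixOf]
        rw [if_pos hpre]
        rw [ih _ _ _ (by simpa using Nat.lt_of_succ_lt_succ h)]
        simp [mySplit, addF]
        cases hms : mySplit rest with
        | nil => exact absurd hms (mySplit_ne_nil rest)
        | cons h t => simp
      · have hpre : [' '].isPrefixOf (c :: rest) = false := by
          simp [List.isPrefixOf]; exact fun hh => absurd hh.symm hc
        rw [if_neg (by simp [hpre])]
        rw [ih _ _ _ (by simpa using Nat.lt_of_succ_lt_succ h)]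
        simp only [mySplit, if_neg hc]
        cases hms : mySplit rest with
        | nil => exact absurd hms (mySplit_ne_nil rest)
        | cons h t => simp [addF]

theorem splitOn_eq_mySplit (l : List Char) : PySem.Chars.splitOn l [' '] = mySplit l := by
  rw [PySem.Chars.splitOn, go_eq (l.length + 1) l [] [] (by omega)]
  cases hms : mySplit l with
  | nil => exact absurd hms (mySplit_ne_nil l)
  | cons h t => simp [addF]

theorem mySplit_lens (cs : List Char) :
    (mySplit ((cs.filter (fun c => c ≠ '|')).map (fun c => if c = 'E' then 'E' else ' '))).map List.length
      = segsL cs := by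
  induction cs with
  | nil => simp [mySplit, segsL]
  | cons c cs ih =>
    by_cases hb : c = '|'
    · simpa [segsL, hb] using ih
    · have hf : (c :: cs).filter (fun c => c ≠ '|') = c :: cs.filter (fun c => c ≠ '|') :=
        List.filter_cons_of_pos (by simp [hb])
      rw [hf, List.map_cons]
      by_cases he : c = 'E'
      · subst he
        rw [if_pos rfl]
        simp only [mySplit, if_neg (by decide : ¬ ('E' = ' '))]
        simp only [segsL, if_neg hb]
        cases hms : mySplit ((cs.filter (fun c => c ≠ '|')).map (fun c => if c = 'E' then 'E' else ' ')) with
        | nil => exact absurd hms (mySplit_ne_nil _)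
        | cons h t =>
          rw [hms] at ih
          simp only [List.map_cons] at ih ⊢
          simp [← ih]
      · rw [if_neg he]
        simp only [mySplit]
        simp only [segsL, if_neg hb, if_neg he]
        simpa using ih

theorem loopA_eq (kn : Nat) : ∀ (cs : List Char) (m : Nat) (rv : Int),
    finishA (kn : Int) (loopA (kn : Int) cs ((m : Int), rv))
    = rv + scoreK kn (((segsL cs).headI + m) :: (segsL cs).tail) := by
  intro cs
  induction cs with
  | nil =>
    intro m rv
    simp only [loopA, finishA, segsL, List.headI, List.tail, scoreK, List.map, List.sum,
      Nat.zero_add, List.foldr]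
    by_cases h : kn ≤ m
    · rw [if_pos (by exact_mod_cast h), if_pos h]
      have h1 : ((m : Int)).toNat = m := by omega
      have h2 : ((kn : Int)).toNat = kn := by omega
      have h3 : ((m : Int) - (kn : Int)).toNat = m - kn := by omega
      rw [h1, h2, h3, binom_div m kn h]
      ring
    · rw [if_neg (by exact_mod_cast h), if_neg h]
      ring
  | cons c cs ih =>
    intro m rv
    by_cases hE : c = 'E'
    · subst hE
      simp only [loopA, reduceIte]
      have h1 : ((m : Int) + 1) = ((m + 1 : Nat) : Int) := by push_cast; ring
      rw [h1, ih (m + 1) rv]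
      simp only [segsL, if_neg (show ¬(('E' : Char) = '|') by decide), if_true,
        List.headI_cons, List.tail_cons]
      congr 3
      omega
    · by_cases hB : c = '|'
      · subst hB
        simp only [loopA, ne_eq]
        rw [if_neg (show ¬(('|' : Char) = 'E') by decide), if_neg (by simp)]
        rw [ih m rv]
        simp [segsL]
      · simp only [loopA, if_neg (fun h => hE h), ne_eq]
        rw [if_pos (by simp [hB])]
        rw [show (0 : Int) = ((0 : Nat) : Int) by simp, ih 0 _]
        simp only [segsL, if_neg hB, if_neg hE]
        cases hs : segsL cs with
        | nil => exact absurd hs (segsL_ne_nil cs)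
        | cons h t =>
          simp only [List.headI, List.tail, scoreK, List.map, List.sum_cons, Nat.zero_add,
            Nat.add_zero]
          by_cases hc : kn ≤ m
          · rw [if_pos (by exact_mod_cast hc), if_pos hc]
            have h1 : ((m : Int)).toNat = m := by omega
            have h2 : ((kn : Int)).toNat = kn := by omega
            have h3 : ((m : Int) - (kn : Int)).toNat = m - kn := by omega
            rw [h1, h2, h3, binom_div m kn hc]
            ring
          · rw [if_neg (by exact_mod_cast hc), if_neg hc]
            ring

theorem foldB (k : Int) : ∀ (zs : List (List Char)) (t : Int),
    zs.foldl (fun total z =>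
      if k ≤ (z.length : Int) then total + combB (z.length : Int) k else total) t
    = t + (zs.map (fun z =>
        if k ≤ (z.length : Int) then combB (z.length : Int) k else 0)).sum := by
  intro zs
  induction zs with
  | nil => intro t; simp
  | cons z zs ih =>
    intro t
    simp only [List.foldl_cons, List.map_cons, List.sum_cons, ih]
    split <;> ring

theorem alt_eq_score (kn : Nat) (s : String) :
    get_num_seating_arrangements_in_row_alt (kn : Int) s = scoreK kn (segsL s.toList) := by
  unfold get_num_seating_arrangements_in_row_alt
  rw [splitOn_eq_mySplit, foldB]
  rw [← mySplit_lens s.toList, scoreK, List.map_map]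
  rw [show (0 : Int) + _ = _ from zero_add _]
  congr 1
  apply List.map_congr_left
  intro z _
  simp only [Function.comp]
  by_cases h : kn ≤ z.length
  · rw [if_pos (by exact_mod_cast h), if_pos h, combB_eq z.length kn h]
  · rw [if_neg (by exact_mod_cast h), if_neg h]

-- ===== VERDICT (by name: the statement is the Claim_ definition above) =====
theorem get_num_seating_arrangements_in_row_spec : Claim_equal_get_num_seating_arrangements_in_row := by
  intro k s _ hpre
  unfold Spec_get_num_seating_arrangements_in_row
  obtain ⟨kn, rfl⟩ : ∃ kn : Nat, k = (kn : Int) := ⟨k.toNat, (Int.toNat_of_nonneg hpre).symm⟩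
  have hA : get_num_seating_arrangements_in_row (kn : Int) s
      = finishA (kn : Int) (loopA (kn : Int) s.toList (((0 : Nat) : Int), 0)) := rfl
  rw [hA, loopA_eq kn s.toList 0 0, alt_eq_score, zero_add]
  cases hs : segsL s.toList with
  | nil => exact absurd hs (segsL_ne_nil s.toList)
  | cons h t => simp
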